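-- pv_equiv track=rewrite | github.com/ECD5A/EllipticZero | app/compute/runners/contract_testbed_runner.py | _match_repo_case_lines
-- ===== SOURCE A (Python) =====
-- from typing import Any
--
-- def _ordered_unique(values: list[str]) -> list[str]:
--     seen: set[str] = set()
--     ordered: list[str] = []
--     for value in values:
--         normalized = str(value).strip()
--         if not normalized or normalized in seen:
--             continue
--         seen.add(normalized)
--         ordered.append(normalized)
--     return ordered
--
-- def _match_repo_case_lines(lines: Any, expected_keywords: list[str]) -> list[str]:
--     if not isinstance(lines, list) or not expected_keywords:
--         return []
--     matched: list[str] = []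
--     for line in lines:
--         text = str(line).strip()
--         lowered = text.lower()
--         if any(keyword in lowered for keyword in expected_keywords):
--             matched.append(text)
--     return _ordered_unique(matched)[:4]
-- ===== SOURCE B (Python) =====
-- from typing import Any
--
-- def _match_repo_case_lines(lines: Any, expected_keywords: list[str]) -> list[str]:
--     # One fused pass: match, dedup and cap at 4 in a single loop with an early break.
--     if not isinstance(lines, list) or not expected_keywords:
--         return []
--     seen: set[str] = set()
--     result: list[str] = []
--     for line in lines:
--         if len(result) == 4:
--             break
--         text = str(line).strip()
--         lowered = text.lower()
--         if text and any(kw in lowered for kw in expected_keywords) and text not in seen: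
--             seen.add(text)
--             result.append(text)
--     return result
-- ===== Notes on version B (the rewrite author's own statement) =====
-- stated objective: faster
-- what changed: Replaces the two-phase collect-all-matches then _ordered_unique then slice structure with one fused loop that matches, dedups via a seen-set and breaks out as soon as 4 results are collected, dropping the _ordered_unique helper.
import Mathlib
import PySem

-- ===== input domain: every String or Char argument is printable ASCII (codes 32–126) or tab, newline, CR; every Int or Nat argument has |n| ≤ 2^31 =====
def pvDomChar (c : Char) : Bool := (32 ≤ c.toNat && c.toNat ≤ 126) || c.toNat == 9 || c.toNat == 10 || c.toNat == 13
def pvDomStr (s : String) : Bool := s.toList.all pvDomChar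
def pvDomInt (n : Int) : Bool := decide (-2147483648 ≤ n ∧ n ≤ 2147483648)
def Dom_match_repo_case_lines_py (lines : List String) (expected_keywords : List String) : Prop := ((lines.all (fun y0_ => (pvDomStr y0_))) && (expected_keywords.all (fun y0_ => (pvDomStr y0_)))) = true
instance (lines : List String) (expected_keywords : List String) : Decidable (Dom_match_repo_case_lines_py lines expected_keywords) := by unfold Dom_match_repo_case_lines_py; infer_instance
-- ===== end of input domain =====

-- B fuses A's two phases (collect all matches, then _ordered_unique, then [:4]) into one
-- loop that matches, dedups with a seen-set, and breaks out once 4 results are collected (measured faster via the early break).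


-- ===== PORT A =====
-- _ordered_unique: loop over values with a seen-set and an ordered accumulator
def pvOrderedUniqueGo : List String → PySem.Set String → List String → List String
  | [], _, ordered => ordered
  | v :: vs, seen, ordered =>
    let normalized := PySem.Str.strip v
    if normalized = "" ∨ PySem.Set.contains seen normalized then
      pvOrderedUniqueGo vs seen ordered
    else
      pvOrderedUniqueGo vs (PySem.Set.add seen normalized) (ordered ++ [normalized])

def pvOrderedUnique (values : List String) : List String :=
  pvOrderedUniqueGo values PySem.Set.empty []

-- the 'for line in lines' matching loop of A
def pvMatchedGo (kws : List String) : List String → List String → List String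
  | [], matched => matched
  | l :: ls, matched =>
    let text := PySem.Str.strip l
    let lowered := PySem.Str.lower text
    if kws.any (fun keyword => PySem.Str.isIn keyword lowered) then
      pvMatchedGo kws ls (matched ++ [text])
    else
      pvMatchedGo kws ls matched

-- 'lines' is typed List String here, so the isinstance check is always true; [:4] = take 4
def match_repo_case_lines_py (lines : List String) (expected_keywords : List String) : List String :=
  if expected_keywords.isEmpty then []
  else (pvOrderedUnique (pvMatchedGo expected_keywords lines [])).take 4

-- ===== PORT B =====
-- the single fused loop of B: break when result has 4 elements
def pvAltGo (kws : List String) : List String → PySem.Set String → List String → List String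
  | [], _, result => result
  | l :: ls, seen, result =>
    if result.length == 4 then result
    else
      let text := PySem.Str.strip l
      let lowered := PySem.Str.lower text
      if text ≠ "" ∧ kws.any (fun kw => PySem.Str.isIn kw lowered) ∧ ¬ PySem.Set.contains seen text then
        pvAltGo kws ls (PySem.Set.add seen text) (result ++ [text])
      else
        pvAltGo kws ls seen result

def match_repo_case_lines_py_alt (lines : List String) (expected_keywords : List String) : List String :=
  if expected_keywords.isEmpty then []
  else pvAltGo expected_keywords lines PySem.Set.empty []

-- ===== PRECONDITION & SPEC =====
def Spec_match_repo_case_lines_py (lines : List String) (expected_keywords : List String) (out : List String) : Prop := out = match_repo_case_lines_py_alt lines expected_keywords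
instance (lines : List String) (expected_keywords : List String) (out : List String) : Decidable (Spec_match_repo_case_lines_py lines expected_keywords out) := by unfold Spec_match_repo_case_lines_py; infer_instance

-- ===== CLAIM (what is proved, stated in full; the proofs are below) =====
def Claim_equal_match_repo_case_lines_py : Prop := ∀ (lines : List String) (expected_keywords : List String), Dom_match_repo_case_lines_py lines expected_keywords → Spec_match_repo_case_lines_py lines expected_keywords (match_repo_case_lines_py lines expected_keywords)

-- ===== LEMMAS AND PROOFS =====

-- an uncapped version of B's fused loop, used only as the proof's middle point
def pvCollect (kws : List String) : List String → PySem.Set String → List String → List String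
  | [], _, result => result
  | l :: ls, seen, result =>
    let text := PySem.Str.strip l
    if text ≠ "" ∧ kws.any (fun kw => PySem.Str.isIn kw (PySem.Str.lower text)) ∧ ¬ PySem.Set.contains seen text then
      pvCollect kws ls (PySem.Set.add seen text) (result ++ [text])
    else
      pvCollect kws ls seen result

-- strip is idempotent
lemma pv_lstrip_of_prefix {y z : List Char}
    (hy : PySem.Chars.lstrip y = y) (hz : z <+: y) : PySem.Chars.lstrip z = z := by
  cases z with
  | nil => simp [PySem.Chars.lstrip]
  | cons c t =>
    cases y with
    | nil => simp at hz
    | cons d u =>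
      have hcd : c = d := by
        obtain ⟨r, hr⟩ := hz
        rw [List.cons_append] at hr
        injection hr
      subst hcd
      by_cases hp : PySem.Chars.isspace c
      · exfalso
        have := hy
        simp [PySem.Chars.lstrip, hp] at this
        have hlen := congrArg List.length this
        have := List.length_dropWhile_le (p := PySem.Chars.isspace) (l := u)
        simp at hlen; omega
      · simp [PySem.Chars.lstrip, hp]

lemma pv_strip_idem (s : String) : PySem.Str.strip (PySem.Str.strip s) = PySem.Str.strip s := by
  apply String.toList_inj.mp
  simp only [PySem.Str.toList_strip]
  set y := PySem.Chars.lstrip s.toList with hy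
  have h1 : PySem.Chars.lstrip y = y := by
    simp [hy, PySem.Chars.lstrip, List.dropWhile_idempotent]
  have h2 : PySem.Chars.rstrip y <+: y := by
    obtain ⟨p, hp⟩ := List.dropWhile_suffix (l := y.reverse) PySem.Chars.isspace
    refine ⟨p.reverse, ?_⟩
    have := congrArg List.reverse hp
    simpa [PySem.Chars.rstrip] using this
  have h3 : PySem.Chars.lstrip (PySem.Chars.rstrip y) = PySem.Chars.rstrip y :=
    pv_lstrip_of_prefix h1 h2
  show PySem.Chars.rstrip (PySem.Chars.lstrip (PySem.Chars.rstrip (PySem.Chars.lstrip s.toList))) = _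
  rw [← hy, h3]
  show PySem.Chars.rstrip (PySem.Chars.rstrip y) = PySem.Chars.rstrip (PySem.Chars.lstrip s.toList)
  rw [← hy]
  simp [PySem.Chars.rstrip, List.dropWhile_idempotent]

-- A's matching loop appends to its accumulator
lemma pvMatchedGo_acc (kws : List String) (ls : List String) (acc : List String) :
    pvMatchedGo kws ls acc = acc ++ pvMatchedGo kws ls [] := by
  induction ls generalizing acc with
  | nil => simp [pvMatchedGo]
  | cons l ls ih =>
    simp only [pvMatchedGo]
    split
    · rw [ih (acc ++ [PySem.Str.strip l]), ih ([] ++ [PySem.Str.strip l])]; simp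
    · exact ih acc

-- fusing A's two phases: ordered-unique over the matched list = the single collect loop
lemma pv_fuse (kws : List String) (ls : List String) (seen : PySem.Set String) (ord : List String) :
    pvOrderedUniqueGo (pvMatchedGo kws ls []) seen ord = pvCollect kws ls seen ord := by
  induction ls generalizing seen ord with
  | nil => simp [pvMatchedGo, pvOrderedUniqueGo, pvCollect]
  | cons l ls ih =>
    simp only [pvMatchedGo, pvCollect]
    by_cases hm : kws.any (fun kw => PySem.Str.isIn kw (PySem.Str.lower (PySem.Str.strip l))) = true
    · rw [if_pos hm, pvMatchedGo_acc, List.nil_append, List.singleton_append]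
      simp only [pvOrderedUniqueGo]
      rw [pv_strip_idem]
      by_cases he : PySem.Str.strip l = ""
      · rw [if_pos (Or.inl he), if_neg (fun h => h.1 he)]
        exact ih seen ord
      · by_cases hs : PySem.Set.contains seen (PySem.Str.strip l) = true
        · rw [if_pos (Or.inr hs), if_neg (fun h => h.2.2 hs)]
          exact ih seen ord
        · rw [if_neg (fun h => h.elim he hs), if_pos ⟨he, hm, hs⟩]
          exact ih _ _
    · rw [if_neg hm, if_neg (fun h => hm h.2.1)]
      exact ih seen ord

-- collect only ever appends to its result accumulator
lemma pvCollect_acc (kws : List String) (ls : List String) (seen : PySem.Set String)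
    (res : List String) : ∃ t, pvCollect kws ls seen res = res ++ t := by
  induction ls generalizing seen res with
  | nil => exact ⟨[], by simp [pvCollect]⟩
  | cons l ls ih =>
    simp only [pvCollect]
    split
    · obtain ⟨t, ht⟩ := ih (PySem.Set.add seen (PySem.Str.strip l)) (res ++ [PySem.Str.strip l])
      exact ⟨PySem.Str.strip l :: t, by simp [ht]⟩
    · exact ih seen res

-- B's capped loop = take 4 of the uncapped collect
lemma pv_cap (kws : List String) (ls : List String) (seen : PySem.Set String)
    (res : List String) (h : res.length ≤ 4) :
    pvAltGo kws ls seen res = (pvCollect kws ls seen res).take 4 := by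
  induction ls generalizing seen res with
  | nil => simp [pvAltGo, pvCollect, List.take_of_length_le h]
  | cons l ls ih =>
    simp only [pvAltGo, pvCollect]
    by_cases h4 : res.length = 4
    · rw [if_pos (by simpa using h4)]
      split
      · obtain ⟨t, ht⟩ := pvCollect_acc kws ls (PySem.Set.add seen (PySem.Str.strip l))
          (res ++ [PySem.Str.strip l])
        rw [ht, List.append_assoc, List.take_append_of_le_length (by omega)]
        exact (List.take_of_length_le (by omega)).symm
      · obtain ⟨t, ht⟩ := pvCollect_acc kws ls seen res
        rw [ht, List.take_append_of_le_length (by omega)]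
        exact (List.take_of_length_le (by omega)).symm
    · rw [if_neg (by simpa using h4)]
      split
      · exact ih _ _ (by simp; omega)
      · exact ih _ _ h

-- ===== VERDICT (by name: the statement is the Claim_ definition above) =====
theorem match_repo_case_lines_py_spec : Claim_equal_match_repo_case_lines_py := by
  intro lines kws _
  unfold Spec_match_repo_case_lines_py match_repo_case_lines_py match_repo_case_lines_py_alt
  by_cases hk : kws.isEmpty
  · simp [hk]
  · rw [if_neg hk, if_neg hk, pvOrderedUnique, pv_fuse, pv_cap _ _ _ _ (by simp)]
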